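-- pv_equiv track=rewrite | github.com/Ikeel04/Proyecto1TC | src/lexer/tokenizer.py | expandir_clases
-- ===== SOURCE A (Python) =====
-- def expandir_clases(expr: str) -> str:
--     r"""
--     Convierte clases de caracteres [abc] en (a|b|c).
--     También maneja secuencias de escape con '\\'.
--     """
--     resultado = ''
--     i = 0
--     while i < len(expr):
--         if expr[i] == '\\':  # escape
--             if i + 1 < len(expr):
--                 resultado += expr[i:i+2]
--                 i += 2
--             else:
--                 raise ValueError("Escape incompleto")
--         elif expr[i] == '[':  # clase de caracteres
--             i += 1
--             contenido = ''
--             while i < len(expr) and expr[i] != ']':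
--                 contenido += expr[i]
--                 i += 1
--             if i < len(expr) and contenido:
--                 resultado += '(' + '|'.join(contenido) + ')'
--                 i += 1
--             else:
--                 raise ValueError("Clase de caracteres sin cerrar o vacía")
--         else:
--             resultado += expr[i]
--             i += 1
--     return resultado
-- ===== SOURCE B (Python) =====
-- def _token(expr, i):
--     """Return (emitted fragment, next position) for the token starting at i."""
--     c = expr[i]
--     if c == '\\':
--         if i + 1 >= len(expr):
--             raise ValueError("Escape incompleto")
--         return expr[i:i+2], i + 2
--     if c == '[':
--         j = expr.find(']', i + 1)
--         if j == -1 or j == i + 1: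
--             raise ValueError("Clase de caracteres sin cerrar o vacía")
--         return '(' + '|'.join(expr[i+1:j]) + ')', j + 1
--     return c, i + 1
--
--
-- def expandir_clases(expr: str) -> str:
--     partes = []
--     i = 0
--     while i < len(expr):
--         frag, i = _token(expr, i)
--         partes.append(frag)
--     return ''.join(partes)
-- ===== Notes on version B (the rewrite author's own statement) =====
-- stated objective: faster
-- what changed: A's inline while-loop with a growing string accumulator (resultado +=) and a char-by-char inner scan for the class body is replaced by a tokenizer helper that matches one token at a time (escape / bracketed class located with str.find / literal), collecting fragments in a list joined once at the end.
import Mathlib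
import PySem

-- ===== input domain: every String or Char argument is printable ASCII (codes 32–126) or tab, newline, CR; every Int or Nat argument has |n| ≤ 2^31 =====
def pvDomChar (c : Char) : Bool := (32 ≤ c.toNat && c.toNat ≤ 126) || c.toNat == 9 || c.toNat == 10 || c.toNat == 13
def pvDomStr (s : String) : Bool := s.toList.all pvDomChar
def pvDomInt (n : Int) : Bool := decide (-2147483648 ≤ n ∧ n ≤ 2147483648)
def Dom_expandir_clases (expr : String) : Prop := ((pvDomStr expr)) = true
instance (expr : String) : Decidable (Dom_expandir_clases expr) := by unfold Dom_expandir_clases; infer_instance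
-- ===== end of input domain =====

-- B replaces A's inline while-loop (string += accumulator, char-by-char inner class scan)
-- by a one-token-at-a-time tokenizer collecting fragments into a list joined once at the end (objective: faster, measured).

-- ===== PORT A =====
-- literal port of A: resultado accumulator, inner while = takeWhile/dropWhile over the suffix;
-- on the two `raise ValueError` paths (excluded by Pre_) the port returns [].
def expandirA : List Char → List Char → List Char
  | [], res => res
  | c :: rest, res =>
    if c = '\\' then
      match rest with
      | [] => []                                   -- raise ValueError "Escape incompleto"
      | d :: r => expandirA r (res ++ [c, d])      -- resultado += expr[i:i+2]
    else if c = '[' then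
      let contenido := rest.takeWhile (· ≠ ']')
      match h : rest.dropWhile (· ≠ ']') with
      | _ :: r =>
        if contenido.isEmpty then []               -- raise ValueError (empty class)
        else expandirA r (res ++ '(' :: List.intersperse '|' contenido ++ [')'])
      | [] => []                                   -- raise ValueError (unclosed class)
    else expandirA rest (res ++ [c])
  termination_by cs _ => cs.length
  decreasing_by
  all_goals first
  | (have := List.length_dropWhile_le (p := (· ≠ ']')) (l := rest)
     rw [h] at this; simp at this ⊢; omega)
  | (simp; omega)
  | simp

def expandir_clases (expr : String) : String := String.ofList (expandirA expr.toList [])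

-- ===== PORT B =====
-- port of Source B's _token: one token starting at the current position (c :: rest);
-- none = the raise paths (excluded by Pre_); find(']')+slices ported as span.
def tokenB (c : Char) (rest : List Char) : Option (List Char × List Char) :=
  if c = '\\' then
    match rest with
    | [] => none
    | d :: r => some ([c, d], r)
  else if c = '[' then
    match rest.span (· ≠ ']') with
    | (inner, _ :: r) =>
        if inner.isEmpty then none
        else some ('(' :: List.intersperse '|' inner ++ [')'], r)
    | (_, []) => none
  else some ([c], rest)

-- termination helper for scanB (the port cites it in decreasing_by)
theorem tokenB_length {c : Char} {rest f r : List Char}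
    (h : tokenB c rest = some (f, r)) : r.length ≤ rest.length := by
  unfold tokenB at h
  split_ifs at h
  · cases rest with
    | nil => simp at h
    | cons d t => simp at h; simp [h.2]
  · rcases hsp : rest.span (· ≠ ']') with ⟨inner, rest'⟩
    rw [hsp] at h
    have hd : rest' = rest.dropWhile (· ≠ ']') := by
      have hs := List.span_eq_takeWhile_dropWhile (p := (· ≠ ']')) (l := rest)
      rw [hsp] at hs
      exact (Prod.mk.injEq _ _ _ _ ▸ hs).2
    have hle : rest'.length ≤ rest.length := by
      rw [hd]; exact List.length_dropWhile_le _ _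
    cases rest' with
    | nil => simp at h
    | cons x xs =>
      simp at hle
      cases hin : inner.isEmpty <;> simp [hin] at h
      rw [← h.2]
      omega
  · simp at h; simp [h.2]

-- port of Source B's main loop: collect fragments, join once at the end.
def scanB : List Char → List (List Char) → List (List Char)
  | [], parts => parts
  | c :: rest, parts =>
    match h : tokenB c rest with
    | none => []                                   -- raise inside _token (excluded by Pre_)
    | some (frag, r) => scanB r (parts ++ [frag])
  termination_by cs _ => cs.length
  decreasing_by
    have := tokenB_length h
    simp
    omega

def expandir_clases_alt (expr : String) : String :=
  String.ofList ((scanB expr.toList []).flatten)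

-- ===== PRECONDITION & SPEC =====
-- Pre_ excludes exactly the inputs where A raises ValueError: a lone trailing backslash, or a '['
-- whose class body is empty or never closed.  Closed form: a 4-state automaton over the characters
-- (0 = top level, 1 = after a backslash, 2 = just after '[', 3 = inside a nonempty class,
-- 4 = dead state for the empty class '[]') must end in state 0.
def preStep (s : Nat) (c : Char) : Nat :=
  if s = 0 then (if c = '\\' then 1 else if c = '[' then 2 else 0)
  else if s = 1 then 0
  else if s = 2 then (if c = ']' then 4 else 3)
  else if s = 3 then (if c = ']' then 0 else 3)
  else 4

def Pre_expandir_clases (expr : String) : Prop := expr.toList.foldl preStep 0 = 0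
instance (expr : String) : Decidable (Pre_expandir_clases expr) := by
  unfold Pre_expandir_clases; infer_instance

def pvWitness_expandir_clases : String := "a[bc]\\d(x|y)"

def Spec_expandir_clases (expr : String) (out : String) : Prop := out = expandir_clases_alt expr
instance (expr : String) (out : String) : Decidable (Spec_expandir_clases expr out) := by
  unfold Spec_expandir_clases; infer_instance

-- ===== CLAIM (what is proved, stated in full; the proofs are below) =====
def Claim_equal_expandir_clases : Prop := ∀ (expr : String), Dom_expandir_clases expr → Pre_expandir_clases expr → Spec_expandir_clases expr (expandir_clases expr)

-- ===== LEMMAS AND PROOFS =====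

-- once-unfolded equations for the class branch of each port (heq/hne: a ']' closes a nonempty body)
theorem tok_class {rest : List Char} {x : Char} {r : List Char}
    (heq : rest.dropWhile (· ≠ ']') = x :: r)
    (hne : ∃ (_ : 0 < rest.length), ¬rest[0] = ']') :
    tokenB '[' rest = some ('(' :: List.intersperse '|' (rest.takeWhile (· ≠ ']')) ++ [')'], r) := by
  unfold tokenB
  rw [if_neg (by decide), if_pos rfl, List.span_eq_takeWhile_dropWhile, heq]
  simp
  exact hne

theorem expA_class {rest : List Char} {x : Char} {r res : List Char}
    (heq : rest.dropWhile (· ≠ ']') = x :: r)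
    (hne : ∃ (_ : 0 < rest.length), ¬rest[0] = ']') :
    expandirA ('[' :: rest) res
      = expandirA r (res ++ ('(' :: List.intersperse '|' (rest.takeWhile (· ≠ ']')) ++ [')'])) := by
  conv_lhs => rw [expandirA.eq_def]
  simp only [reduceIte, if_neg (show ¬('[' = '\\') by decide)]
  split
  · rename_i x' r' heq'
    rw [heq] at heq'
    cases heq'
    rw [if_neg (by simp; exact hne), List.append_assoc]
  · rename_i heq'
    rw [heq] at heq'
    cases heq'

-- the dead state 4 absorbs
theorem absorb4 : ∀ (l : List Char), List.foldl preStep 4 l = 4 := by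
  intro l
  induction l with
  | nil => rfl
  | cons c r ih => simpa [preStep] using ih

-- a run that starts inside a nonempty class and ends accepted reaches a ']' and resumes at top level
theorem run3 : ∀ (rest : List Char), List.foldl preStep 3 rest = 0 →
    ∃ r', rest.dropWhile (· ≠ ']') = ']' :: r' ∧ List.foldl preStep 0 r' = 0 := by
  intro rest
  induction rest with
  | nil => intro h; simp at h
  | cons c r ih =>
    intro h
    by_cases hc : c = ']'
    · subst hc
      simp [preStep] at h
      exact ⟨r, by simp, h⟩
    · simp [preStep, hc] at h
      obtain ⟨r', hdw, h0⟩ := ih h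
      exact ⟨r', by simpa [hc] using hdw, h0⟩

-- one step of both programs: under Pre_, B's tokenizer succeeds, its leftover keeps Pre_,
-- and A's loop body appends exactly the fragment B emits
theorem step_lemma {c : Char} {rest : List Char} (h : List.foldl preStep 0 (c :: rest) = 0) :
    ∃ f r, tokenB c rest = some (f, r) ∧ List.foldl preStep 0 r = 0 ∧
      (∀ res, expandirA (c :: rest) res = expandirA r (res ++ f)) := by
  by_cases h1 : c = '\\'
  · subst h1
    cases rest with
    | nil => simp [preStep] at h
    | cons d r =>
      refine ⟨['\\', d], r, ?_, ?_, ?_⟩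
      · simp [tokenB]
      · simpa [preStep] using h
      · intro res; simp [expandirA]
  · by_cases h2 : c = '['
    · subst h2
      simp only [List.foldl_cons] at h
      rw [show preStep 0 '[' = 2 by simp [preStep, h1]] at h
      cases rest with
      | nil => simp at h
      | cons a t =>
        by_cases ha : a = ']'
        · subst ha
          simp only [List.foldl_cons] at h
          rw [show preStep 2 ']' = 4 by simp [preStep], absorb4] at h
          simp at h
        · simp only [List.foldl_cons] at h
          rw [show preStep 2 a = 3 by simp [preStep, ha]] at h
          obtain ⟨r', hdw, h0⟩ := run3 t h
          have heq : (a :: t).dropWhile (· ≠ ']') = ']' :: r' := by simpa [ha] using hdw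
          have hne : ∃ (_ : 0 < (a :: t).length), ¬(a :: t)[0] = ']' := ⟨by simp, by simpa using ha⟩
          exact ⟨'(' :: List.intersperse '|' ((a :: t).takeWhile (· ≠ ']')) ++ [')'], r',
            tok_class heq hne, h0, fun res => expA_class heq hne⟩
    · refine ⟨[c], rest, ?_, ?_, ?_⟩
      · simp [tokenB, h1, h2]
      · simpa [preStep, h1, h2] using h
      · intro res
        conv_lhs => rw [expandirA.eq_def]
        simp only [if_neg h1, if_neg h2]

theorem scanB_cons {c : Char} {rest : List Char} {parts : List (List Char)} {f r : List Char}
    (htok : tokenB c rest = some (f, r)) :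
    scanB (c :: rest) parts = scanB r (parts ++ [f]) := by
  conv_lhs => rw [scanB]
  split
  · simp_all
  · rename_i frag r' heq
    rw [htok] at heq
    cases heq
    rfl

theorem scanB_acc : ∀ (n : Nat) (cs : List Char), cs.length ≤ n → List.foldl preStep 0 cs = 0 →
    ∀ parts, scanB cs parts = parts ++ scanB cs [] := by
  intro n
  induction n with
  | zero => intro cs hlen _ parts; rw [List.length_eq_zero_iff.mp (Nat.le_zero.mp hlen)]; simp [scanB]
  | succ n ih =>
    intro cs hlen hpre parts
    cases cs with
    | nil => simp [scanB]
    | cons c rest =>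
      obtain ⟨f, r, htok, hpre', _⟩ := step_lemma hpre
      have hr : r.length ≤ n := by
        have := tokenB_length htok; simp at hlen; omega
      rw [scanB_cons htok, scanB_cons htok, ih r hr hpre' (parts ++ [f]),
        ih r hr hpre' ([] ++ [f]), List.nil_append]
      simp

theorem main_lemma : ∀ (n : Nat) (cs : List Char), cs.length ≤ n → List.foldl preStep 0 cs = 0 →
    ∀ res, expandirA cs res = res ++ (scanB cs []).flatten := by
  intro n
  induction n with
  | zero => intro cs hlen _ res; rw [List.length_eq_zero_iff.mp (Nat.le_zero.mp hlen)]; simp [expandirA, scanB]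
  | succ n ih =>
    intro cs hlen hpre res
    cases cs with
    | nil => simp [expandirA, scanB]
    | cons c rest =>
      obtain ⟨f, r, htok, hpre', hstep⟩ := step_lemma hpre
      have hr : r.length ≤ n := by
        have := tokenB_length htok; simp at hlen; omega
      rw [hstep res, ih r hr hpre' (res ++ f), scanB_cons htok,
        scanB_acc n r hr hpre' ([] ++ [f]), List.nil_append]
      simp

-- ===== VERDICT (by name: the statement is the Claim_ definition above) =====
theorem expandir_clases_spec : Claim_equal_expandir_clases := by
  intro expr _ hpre
  unfold Spec_expandir_clases expandir_clases expandir_clases_alt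
  rw [main_lemma expr.toList.length expr.toList le_rfl hpre []]
  rfl
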